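-- pv_equiv track=rewrite | github.com/foxsroot/ChatSeek | search_engine/app_v12.py | tokens_are_adjacent
-- ===== SOURCE A (Python) =====
-- def tokens_are_adjacent(token_positions):
--     if not token_positions or len(token_positions) < 2:
--         return True
--
--     positions = list(token_positions.values())
--
--     for i in range(len(positions) - 1):
--         found_adjacent = False
--         for pos1 in positions[i]:
--             for pos2 in positions[i + 1]:
--                 if (pos2 - pos1) == 1:
--                     found_adjacent = True
--                     break
--             if found_adjacent:
--                 break
--         if not found_adjacent:
--             return False
--     return True
-- ===== SOURCE B (Python) =====
-- def tokens_are_adjacent(token_positions):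
--     if not token_positions or len(token_positions) < 2:
--         return True
--     positions = list(token_positions.values())
--     for cur, nxt in zip(positions, positions[1:]):
--         a = sorted(cur)
--         b = sorted(nxt)
--         i = j = 0
--         found = False
--         while i < len(a) and j < len(b):
--             if b[j] < a[i] + 1:
--                 j += 1
--             elif b[j] > a[i] + 1:
--                 i += 1
--             else:
--                 found = True
--                 break
--         if not found:
--             return False
--     return True
-- ===== Notes on version B (the rewrite author's own statement) =====
-- stated objective: alternative
-- what changed: Replaces A's nested pos1/pos2 rescans per consecutive pair with sort-then-two-pointer merge: each pair's lists are sorted and a single synchronized pass over the two sorted cursors detects a p,p+1 match.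
import Mathlib
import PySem

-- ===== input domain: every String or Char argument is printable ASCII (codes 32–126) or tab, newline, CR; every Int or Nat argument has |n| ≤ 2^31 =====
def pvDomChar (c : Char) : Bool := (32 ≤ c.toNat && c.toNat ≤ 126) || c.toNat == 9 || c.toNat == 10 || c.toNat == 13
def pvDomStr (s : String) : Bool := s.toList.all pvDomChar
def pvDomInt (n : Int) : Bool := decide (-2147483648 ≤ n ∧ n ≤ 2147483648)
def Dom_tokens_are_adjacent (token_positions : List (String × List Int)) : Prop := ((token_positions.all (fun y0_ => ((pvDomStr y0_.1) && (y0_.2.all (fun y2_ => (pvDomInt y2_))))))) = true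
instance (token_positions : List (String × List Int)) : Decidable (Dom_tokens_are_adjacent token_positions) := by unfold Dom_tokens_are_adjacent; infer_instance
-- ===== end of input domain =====

-- B replaces A's nested pos1/pos2 rescans per pair with sort-then-two-pointer merge over both sorted lists; alternative algorithm, same return value.

-- ===== PORT A =====
-- outer 'for i in range(len(positions)-1)'; each pair checked by nested pos1/pos2 scans with early break
def pvLoopA : List (List Int) → Bool
  | l1 :: l2 :: rest =>
      if l1.any (fun pos1 => l2.any (fun pos2 => pos2 - pos1 == 1)) then pvLoopA (l2 :: rest)
      else false
  | _ => true

def tokens_are_adjacent (token_positions : List (String × List Int)) : Bool :=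
  if token_positions.isEmpty || token_positions.length < 2 then true
  else pvLoopA (token_positions.map Prod.snd)

-- ===== PORT B =====
-- the two-pointer while loop over the sorted copies a, b (advancing j / i / match)
def pvMerge : List Int → List Int → Bool
  | a :: as, b :: bs =>
      if b < a + 1 then pvMerge (a :: as) bs
      else if b > a + 1 then pvMerge as (b :: bs)
      else true
  | _, _ => false
termination_by a b => a.length + b.length

-- 'for cur, nxt in zip(positions, positions[1:])' with early 'return False'
def pvLoopB : List (List Int) → Bool
  | cur :: nxt :: rest =>
      if pvMerge (PySem.List.sorted cur (fun x => x) false) (PySem.List.sorted nxt (fun x => x) false)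
      then pvLoopB (nxt :: rest) else false
  | _ => true

def tokens_are_adjacent_alt (token_positions : List (String × List Int)) : Bool :=
  if token_positions.isEmpty || token_positions.length < 2 then true
  else pvLoopB (token_positions.map Prod.snd)

-- ===== PRECONDITION & SPEC =====
def Spec_tokens_are_adjacent (token_positions : List (String × List Int)) (out : Bool) : Prop := out = tokens_are_adjacent_alt token_positions
instance (token_positions : List (String × List Int)) (out : Bool) : Decidable (Spec_tokens_are_adjacent token_positions out) := by unfold Spec_tokens_are_adjacent; infer_instance

-- ===== CLAIM =====
def Claim_equal_tokens_are_adjacent : Prop := ∀ (token_positions : List (String × List Int)), Dom_tokens_are_adjacent token_positions → Spec_tokens_are_adjacent token_positions (tokens_are_adjacent token_positions)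

-- ===== LEMMAS AND PROOFS =====

-- the two-pointer merge on sorted lists finds exactly a pair y = x + 1
lemma pvMerge_iff (l1 l2 : List Int) (h1 : l1.Pairwise (· ≤ ·)) (h2 : l2.Pairwise (· ≤ ·)) :
    pvMerge l1 l2 = true ↔ ∃ x ∈ l1, ∃ y ∈ l2, y = x + 1 := by
  induction l1, l2 using pvMerge.induct with
  | case1 a as b bs hlt ih =>
      rw [pvMerge, if_pos hlt, ih h1 (List.Pairwise.sublist (List.sublist_cons_self b bs) h2)]
      constructor
      · rintro ⟨x, hx, y, hy, he⟩; exact ⟨x, hx, y, List.mem_cons_of_mem _ hy, he⟩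
      · rintro ⟨x, hx, y, hy, he⟩
        rcases List.mem_cons.mp hy with rfl | hy
        · exfalso
          rcases List.mem_cons.mp hx with rfl | hx
          · omega
          · have := (List.pairwise_cons.mp h1).1 x hx; omega
        · exact ⟨x, hx, y, hy, he⟩
  | case2 a as b bs hlt hgt ih =>
      rw [pvMerge, if_neg hlt, if_pos hgt,
        ih (List.Pairwise.sublist (List.sublist_cons_self a as) h1) h2]
      constructor
      · rintro ⟨x, hx, y, hy, he⟩; exact ⟨x, List.mem_cons_of_mem _ hx, y, hy, he⟩
      · rintro ⟨x, hx, y, hy, he⟩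
        rcases List.mem_cons.mp hx with rfl | hx
        · exfalso
          rcases List.mem_cons.mp hy with rfl | hy
          · omega
          · have := (List.pairwise_cons.mp h2).1 y hy; omega
        · exact ⟨x, hx, y, hy, he⟩
  | case3 a as b bs hlt hgt =>
      rw [pvMerge, if_neg hlt, if_neg hgt]
      have : b = a + 1 := by omega
      subst this
      simp only [true_iff]
      exact ⟨a, List.mem_cons_self, a + 1, List.mem_cons_self, rfl⟩
  | case4 l1 l2 h =>
      rw [pvMerge.eq_def]
      match l1, l2 with
      | [], l2 => simp
      | a :: as, [] => simp
      | a :: as, b :: bs => exact (h a as b bs rfl rfl).elim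

-- per pair: A's nested scan agrees with B's merge of the sorted copies
lemma pvPair_eq (l1 l2 : List Int) :
    (l1.any (fun pos1 => l2.any (fun pos2 => pos2 - pos1 == 1)))
      = pvMerge (PySem.List.sorted l1 (fun x => x) false) (PySem.List.sorted l2 (fun x => x) false) := by
  rw [Bool.eq_iff_iff,
    pvMerge_iff _ _ (PySem.List.sorted_pairwise l1 (fun x => x))
      (PySem.List.sorted_pairwise l2 (fun x => x))]
  simp only [List.any_eq_true, beq_iff_eq, PySem.List.mem_sorted]
  constructor
  · rintro ⟨x, hx, y, hy, h⟩; exact ⟨x, hx, y, hy, by omega⟩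
  · rintro ⟨x, hx, y, hy, h⟩; exact ⟨x, hx, y, hy, by omega⟩

lemma pvLoop_eq (ps : List (List Int)) : pvLoopA ps = pvLoopB ps := by
  match ps with
  | [] => rfl
  | [l] => rfl
  | l1 :: l2 :: rest =>
      rw [pvLoopA, pvLoopB, pvPair_eq, pvLoop_eq (l2 :: rest)]

-- ===== VERDICT =====
theorem tokens_are_adjacent_spec : Claim_equal_tokens_are_adjacent := by
  intro tp _
  unfold Spec_tokens_are_adjacent tokens_are_adjacent tokens_are_adjacent_alt
  split
  · rfl
  · exact pvLoop_eq _
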